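-- pv_equiv track=rewrite | github.com/ronakdm/nlp-hw5 | bpe.py | merge_bigram
-- ===== SOURCE A (Python) =====
-- def merge_bigram(words, type1, type2):
--     for word in words:
--         # Iterate over bigrams in this word.
--         i = 1
--         while i < len(word):
--             # Add a count for this bigram.
--             if type1 == word[i - 1] and type2 == word[i]:
--                 # Merge the two.
--                 word[i - 1] = word[i - 1] + word[i]
--                 word.pop(i)
--             i += 1
--
--     return words
-- ===== SOURCE B (Python) =====
-- def merge_bigram(words, type1, type2):
--     # Two passes per word: collect the non-overlapping match start positions,
--     # then rebuild the word from them; mutates each word in place like A.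
--     for word in words:
--         starts = []
--         j = 1
--         while j < len(word):
--             if word[j - 1] == type1 and word[j] == type2:
--                 starts.append(j - 1)
--                 j += 2
--             else:
--                 j += 1
--         new = []
--         k = 0
--         for s in starts:
--             new.extend(word[k:s])
--             new.append(word[s] + word[s + 1])
--             k = s + 2
--         new.extend(word[k:])
--         word[:] = new
--     return words
-- ===== Notes on version B (the rewrite author's own statement) =====
-- stated objective: alternative
-- what changed: Replaces A's single interleaved in-place scan (merge-then-pop inside the index loop) with two sequential passes per word: first collect the non-overlapping match start indices with the same greedy skip, then rebuild the word from those indices and write it back with word[:]=.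
import Mathlib
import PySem

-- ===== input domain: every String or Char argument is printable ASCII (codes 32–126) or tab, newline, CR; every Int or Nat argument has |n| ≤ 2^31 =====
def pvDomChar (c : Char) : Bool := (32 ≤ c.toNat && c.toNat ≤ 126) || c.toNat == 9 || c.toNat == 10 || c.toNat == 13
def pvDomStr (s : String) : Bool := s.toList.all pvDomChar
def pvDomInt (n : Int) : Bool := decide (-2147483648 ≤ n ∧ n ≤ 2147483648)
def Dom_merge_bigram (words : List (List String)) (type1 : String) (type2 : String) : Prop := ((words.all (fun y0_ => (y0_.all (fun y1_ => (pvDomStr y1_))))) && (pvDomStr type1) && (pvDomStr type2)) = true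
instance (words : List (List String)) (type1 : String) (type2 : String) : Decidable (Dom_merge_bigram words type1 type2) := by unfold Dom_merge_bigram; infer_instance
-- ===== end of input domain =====

-- B rebuilds each word in two passes (collect match starts, then rebuild) instead of A's
-- interleaved pop-based scan; equivalence is about the returned value (both Pythons also
-- mutate each inner word list in place to the same contents).

-- ===== PORT A =====
-- A's while loop over a mutable word: word[i-1] and word[i] are always in range (1 ≤ i < len),
-- so List.getD never hits its default; word.pop(i) at a valid index is List.eraseIdx i.
def mergeA (t1 t2 : String) (word : List String) (i : Nat) : List String :=
  if h : i < word.length then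
    if t1 = word.getD (i - 1) "" ∧ t2 = word.getD i "" then
      mergeA t1 t2 ((word.set (i - 1) (word.getD (i - 1) "" ++ word.getD i "")).eraseIdx i) (i + 1)
    else
      mergeA t1 t2 word (i + 1)
  else word
termination_by word.length - i
decreasing_by
  · simp [List.length_eraseIdx, h]; omega
  · omega

def merge_bigram (words : List (List String)) (type1 : String) (type2 : String) : List (List String) :=
  words.map (fun word => mergeA type1 type2 word 1)

-- ===== PORT B =====
-- pass 1: collect the starting indices j-1 of the non-overlapping matches (greedy skip j += 2)
def collectB (t1 t2 : String) (word : List String) (j : Nat) : List Nat :=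
  if h : j < word.length then
    if word.getD (j - 1) "" = t1 ∧ word.getD j "" = t2 then
      (j - 1) :: collectB t1 t2 word (j + 2)
    else
      collectB t1 t2 word (j + 1)
  else []
termination_by word.length - j

-- pass 2: rebuild from the collected starts; word[k:s] = (word.drop k).take (s-k) and
-- word[k:] = word.drop k since 0 ≤ k ≤ s are in-range Nat indices.
def rebuildB (word : List String) : List Nat → Nat → List String
  | [], k => word.drop k
  | s :: rest, k =>
      ((word.drop k).take (s - k)) ++ (word.getD s "" ++ word.getD (s + 1) "") :: rebuildB word rest (s + 2)

def merge_bigram_alt (words : List (List String)) (type1 : String) (type2 : String) : List (List String) :=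
  words.map (fun word => rebuildB word (collectB type1 type2 word 1) 0)

-- ===== PRECONDITION & SPEC =====
def Spec_merge_bigram (words : List (List String)) (type1 : String) (type2 : String) (out : List (List String)) : Prop := out = merge_bigram_alt words type1 type2
instance (words : List (List String)) (type1 : String) (type2 : String) (out : List (List String)) : Decidable (Spec_merge_bigram words type1 type2 out) := by unfold Spec_merge_bigram; infer_instance

-- ===== CLAIM (what is proved, stated in full; the proofs are below) =====
def Claim_equal_merge_bigram : Prop := ∀ (words : List (List String)) (type1 : String) (type2 : String), Dom_merge_bigram words type1 type2 → Spec_merge_bigram words type1 type2 (merge_bigram words type1 type2)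

-- ===== LEMMAS AND PROOFS =====

-- reference greedy merge both ports are reduced to
def greedy (t1 t2 : String) : List String → List String
  | a :: b :: rest => if t1 = a ∧ t2 = b then (a ++ b) :: greedy t1 t2 rest else a :: greedy t1 t2 (b :: rest)
  | l => l

theorem getD_append_len {α : Type} (p l : List α) (n : Nat) (d : α) :
    (p ++ l).getD (p.length + n) d = l.getD n d := by
  induction p with
  | nil => simp
  | cons x xs ih => simpa [Nat.succ_add, List.getD] using ih

theorem set_append_len {α : Type} (p l : List α) (a : α) :
    (p ++ l).set p.length a = p ++ l.set 0 a := by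
  induction p with
  | nil => simp
  | cons x xs ih => simp [ih]

theorem eraseIdx_append_len {α : Type} (p l : List α) (n : Nat) :
    (p ++ l).eraseIdx (p.length + n) = p ++ l.eraseIdx n := by
  induction p with
  | nil => simp
  | cons x xs ih => simp [Nat.succ_add, ih]

theorem mergeA_eq_greedy (t1 t2 : String) :
    ∀ (n : Nat) (rest p : List String), rest.length ≤ n →
      mergeA t1 t2 (p ++ rest) (p.length + 1) = p ++ greedy t1 t2 rest := by
  intro n
  induction n with
  | zero =>
    intro rest p h
    have : rest = [] := List.length_eq_zero_iff.mp (Nat.le_zero.mp h)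
    subst this
    rw [mergeA, dif_neg (by simp)]; simp [greedy]
  | succ m ih =>
    intro rest p h
    match rest with
    | [] => rw [mergeA, dif_neg (by simp)]; simp [greedy]
    | [a] => rw [mergeA, dif_neg (by simp)]; simp [greedy]
    | a :: b :: rest' =>
      rw [mergeA]
      have hlt : p.length + 1 < (p ++ a :: b :: rest').length := by simp
      have h1 : (p ++ a :: b :: rest').getD (p.length + 1 - 1) "" = a := by
        simpa using getD_append_len p (a :: b :: rest') 0 ""
      have h2 : (p ++ a :: b :: rest').getD (p.length + 1) "" = b := by
        simpa using getD_append_len p (a :: b :: rest') 1 ""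
      rw [dif_pos hlt, h1, h2]
      by_cases hc : t1 = a ∧ t2 = b
      · rw [if_pos hc]
        have hset : (p ++ a :: b :: rest').set (p.length + 1 - 1) (a ++ b) = p ++ (a ++ b) :: b :: rest' := by
          simpa using set_append_len p (a :: b :: rest') (a ++ b)
        have herase : (p ++ (a ++ b) :: b :: rest').eraseIdx (p.length + 1) = p ++ (a ++ b) :: rest' := by
          simpa using eraseIdx_append_len p ((a ++ b) :: b :: rest') 1
        rw [hset, herase]
        have ihr := ih rest' (p ++ [a ++ b]) (by simp at h ⊢; omega)
        have elen : (p ++ [a ++ b]).length = p.length + 1 := by simp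
        rw [elen] at ihr
        simp only [List.append_assoc, List.cons_append, List.nil_append] at ihr
        rw [ihr]
        simp [greedy, hc]
      · rw [if_neg hc]
        have ihr := ih (b :: rest') (p ++ [a]) (by simp at h ⊢; omega)
        have elen : (p ++ [a]).length = p.length + 1 := by simp
        rw [elen] at ihr
        simp only [List.append_assoc, List.cons_append, List.nil_append] at ihr
        rw [ihr]
        simp [greedy, hc]

theorem collect_ge (t1 t2 : String) (word : List String) :
    ∀ (n j : Nat), word.length ≤ j + n → ∀ s ∈ collectB t1 t2 word j, j ≤ s + 1 := by
  intro n
  induction n with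
  | zero =>
    intro j h s hs
    rw [collectB, dif_neg (by omega)] at hs
    simp at hs
  | succ m ih =>
    intro j h s hs
    rw [collectB] at hs
    by_cases hj : j < word.length
    · rw [dif_pos hj] at hs
      by_cases hc : word.getD (j - 1) "" = t1 ∧ word.getD j "" = t2
      · rw [if_pos hc] at hs
        rcases List.mem_cons.mp hs with h1 | h1
        · omega
        · have := ih (j + 2) (by omega) s h1; omega
      · rw [if_neg hc] at hs
        have := ih (j + 1) (by omega) s hs; omega
    · rw [dif_neg hj] at hs; simp at hs

theorem rebuild_step (word : List String) (k : Nat) (hk : k < word.length) (L : List Nat)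
    (hL : ∀ s ∈ L, k + 1 ≤ s) :
    rebuildB word L k = word.getD k "" :: rebuildB word L (k + 1) := by
  have hdrop : word.drop k = word.getD k "" :: word.drop (k + 1) := by
    rw [List.drop_eq_getElem_cons hk]
    simp [List.getD_eq_getElem?_getD, List.getElem?_eq_getElem hk]
  cases L with
  | nil => simp [rebuildB, hdrop]
  | cons s rest =>
    have hs : k + 1 ≤ s := hL s (List.mem_cons_self)
    have hsk : s - k = (s - (k + 1)) + 1 := by omega
    simp [rebuildB, hdrop, hsk]

theorem alt_eq_greedy (t1 t2 : String) :
    ∀ (n : Nat) (rest p : List String), rest.length ≤ n →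
      rebuildB (p ++ rest) (collectB t1 t2 (p ++ rest) (p.length + 1)) p.length = greedy t1 t2 rest := by
  intro n
  induction n with
  | zero =>
    intro rest p h
    have : rest = [] := List.length_eq_zero_iff.mp (Nat.le_zero.mp h)
    subst this
    rw [collectB, dif_neg (by simp)]
    simp [rebuildB, greedy]
  | succ m ih =>
    intro rest p h
    match rest with
    | [] =>
      rw [collectB, dif_neg (by simp)]
      simp [rebuildB, greedy]
    | [a] =>
      rw [collectB, dif_neg (by simp)]
      simp [rebuildB, greedy]
    | a :: b :: rest' =>
      rw [collectB]
      have hlt : p.length + 1 < (p ++ a :: b :: rest').length := by simp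
      have h1 : (p ++ a :: b :: rest').getD (p.length + 1 - 1) "" = a := by
        simpa using getD_append_len p (a :: b :: rest') 0 ""
      have h2 : (p ++ a :: b :: rest').getD (p.length + 1) "" = b := by
        simpa using getD_append_len p (a :: b :: rest') 1 ""
      rw [dif_pos hlt, h1, h2]
      have ga : (p ++ a :: b :: rest').getD p.length "" = a := by
        simpa using getD_append_len p (a :: b :: rest') 0 ""
      by_cases hc : a = t1 ∧ b = t2
      · rw [if_pos hc]
        simp only [Nat.add_sub_cancel, rebuildB, Nat.sub_self, List.take_zero, List.nil_append]
        have ihr := ih rest' (p ++ [a, b]) (by simp at h ⊢; omega)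
        have elen : (p ++ [a, b]).length = p.length + 2 := by simp
        rw [elen] at ihr
        simp only [List.append_assoc, List.cons_append, List.nil_append] at ihr
        have e2 : p.length + 1 + 2 = p.length + 2 + 1 := by omega
        rw [ga, h2, e2, ihr]
        have hc' : t1 = a ∧ t2 = b := ⟨hc.1.symm, hc.2.symm⟩
        simp [greedy, hc']
      · rw [if_neg hc]
        have ihr := ih (b :: rest') (p ++ [a]) (by simp at h ⊢; omega)
        have elen : (p ++ [a]).length = p.length + 1 := by simp
        rw [elen] at ihr
        simp only [List.append_assoc, List.cons_append, List.nil_append] at ihr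
        have hkL : ∀ s ∈ collectB t1 t2 (p ++ a :: b :: rest') (p.length + 1 + 1), p.length + 1 ≤ s := by
          intro s hs
          have := collect_ge t1 t2 (p ++ a :: b :: rest') (p ++ a :: b :: rest').length
            (p.length + 1 + 1) (by omega) s hs
          omega
        have hkl : p.length < (p ++ a :: b :: rest').length := by simp
        rw [rebuild_step (p ++ a :: b :: rest') p.length hkl _ hkL, ga]
        have e2 : p.length + 1 + 1 = p.length + 1 + 1 := rfl
        rw [ihr]
        have hc' : ¬ (t1 = a ∧ t2 = b) := fun hx => hc ⟨hx.1.symm, hx.2.symm⟩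
        simp [greedy, hc']

theorem word_eq (t1 t2 : String) (w : List String) :
    mergeA t1 t2 w 1 = rebuildB w (collectB t1 t2 w 1) 0 := by
  have hA := mergeA_eq_greedy t1 t2 w.length w [] (le_refl _)
  have hB := alt_eq_greedy t1 t2 w.length w [] (le_refl _)
  simp only [List.nil_append, List.length_nil] at hA hB
  rw [hA, hB]

-- ===== VERDICT (by name: the statement is the Claim_ definition above) =====
theorem merge_bigram_spec : Claim_equal_merge_bigram := by
  intro words t1 t2 _
  unfold Spec_merge_bigram merge_bigram merge_bigram_alt
  exact List.map_congr_left fun w _ => word_eq t1 t2 w
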